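-- pv_equiv track=rewrite | github.com/furry-world/kasm | src/parser.py | numberToHytes
-- ===== SOURCE A (Python) =====
-- def numberToHytes(value, bits):
--     numFullHytes = bits // 6
--     numLeftoverBits = bits % 6
--
--     hytes = []
--     for i in range(numFullHytes):
--         hytes.append(value % 64)
--         value //= 64
--
--     if numLeftoverBits > 0:
--         mask = (2**numLeftoverBits) - 1
--         hytes.append(value & mask)
--
--     # reverse because little-endian
--     hytes.reverse()
--     return hytes
-- ===== SOURCE B (Python) =====
-- def numberToHytes(value, bits):
--     # Render the (masked) value as a fixed-width binary string and walk it
--     # big-endian: top leftover-bit chunk first, then 6-bit chunks.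
--     if bits == 0:
--         return []
--     m = value & ((1 << bits) - 1)
--     s = format(m, '0{}b'.format(bits))
--     r = bits % 6
--     hytes = []
--     rest = s
--     if r > 0:
--         hytes.append(int(rest[:r], 2))
--         rest = rest[r:]
--     while rest:
--         hytes.append(int(rest[:6], 2))
--         rest = rest[6:]
--     return hytes
-- ===== Notes on version B (the rewrite author's own statement) =====
-- stated objective: idiomatic
-- what changed: B masks the value once, renders it as one fixed-width binary string and walks it big-endian (leftover-bit chunk first, then 6-bit chunks), instead of A's LSB-first mod/floordiv loop followed by a reverse.
-- outside the precondition, e.g. on numberToHytes(5, -1): A returns [5], B raises ValueError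
import Mathlib
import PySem

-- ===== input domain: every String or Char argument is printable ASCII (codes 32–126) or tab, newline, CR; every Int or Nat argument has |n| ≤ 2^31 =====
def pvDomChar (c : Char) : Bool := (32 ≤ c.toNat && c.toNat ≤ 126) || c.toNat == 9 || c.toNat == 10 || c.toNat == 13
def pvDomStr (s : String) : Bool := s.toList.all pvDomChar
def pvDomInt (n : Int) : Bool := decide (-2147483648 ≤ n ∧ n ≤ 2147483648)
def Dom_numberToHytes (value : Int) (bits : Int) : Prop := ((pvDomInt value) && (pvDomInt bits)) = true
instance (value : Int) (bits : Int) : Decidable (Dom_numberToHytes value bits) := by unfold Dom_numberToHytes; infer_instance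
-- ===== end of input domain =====

-- B renders the masked value as one fixed-width binary string walked big-endian, instead of
-- A's LSB-first mod/floordiv loop followed by a reverse (objective: idiomatic; same cost).

-- ===== PORT A =====
-- '2**numLeftoverBits': numLeftoverBits = bits % 6 is always in [0,5] (Python takes the
-- divisor's sign), so the exponent '.toNat' is exact.
def numberToHytes (value : Int) (bits : Int) : List Int :=
  let numFullHytes := PySem.Int.floordiv bits 6
  let numLeftoverBits := PySem.Int.mod bits 6
  let st := (PySem.List.pyRange 0 numFullHytes 1).foldl
      (fun (st : Int × List Int) _ =>
        (PySem.Int.floordiv st.1 64, st.2 ++ [PySem.Int.mod st.1 64])) (value, [])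
  let hytes := if numLeftoverBits > 0
    then st.2 ++ [PySem.Int.band st.1 (2 ^ numLeftoverBits.toNat - 1)]
    else st.2
  hytes.reverse

-- ===== PORT B =====
-- hand port of format(n, 'b') for n ≥ 0: most-significant-first binary digits ('' for 0)
def pvBinDigits (n : Nat) : List Char :=
  if n = 0 then [] else pvBinDigits (n / 2) ++ [if n % 2 = 1 then '1' else '0']

-- hand port of format(m, '0{w}b') for m ≥ 0, w ≥ 1: left-pad with '0' to width w
def pvFormatBin (m w : Nat) : List Char :=
  List.replicate (w - (pvBinDigits m).length) '0' ++ pvBinDigits m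

-- hand port of int(s, 2) for a string of '0'/'1' chars
def pvParseBin (s : List Char) : Int :=
  s.foldl (fun a c => 2 * a + (if c = '1' then 1 else 0)) 0

-- the 'while rest:' loop of Source B: emit int(rest[:6], 2), continue on rest[6:]
def pvChunks6 (s : List Char) : List Int :=
  if s.isEmpty then [] else pvParseBin (s.take 6) :: pvChunks6 (s.drop 6)
termination_by s.length
decreasing_by
  cases s with
  | nil => simp_all
  | cons a t => simp [List.length_drop]

-- '(1 << bits) - 1' with bits ≥ 1 inside the branch, so '.toNat' on the shift count is exact
def numberToHytes_alt (value : Int) (bits : Int) : List Int :=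
  if bits = 0 then [] else
  let m := PySem.Int.band value (2 ^ bits.toNat - 1)
  let s := pvFormatBin m.toNat bits.toNat
  let r := PySem.Int.mod bits 6
  if r > 0 then pvParseBin (s.take r.toNat) :: pvChunks6 (s.drop r.toNat)
  else pvChunks6 s

-- ===== PRECONDITION & SPEC =====
-- Pre_ excludes negative bit counts, on which A's non-empty results (e.g. [value & 31] for
-- bits = -1) are artefacts of Python floor division and B raises ValueError on '1 << bits'.
def Pre_numberToHytes (value : Int) (bits : Int) : Prop := 0 ≤ bits
instance (value : Int) (bits : Int) : Decidable (Pre_numberToHytes value bits) := by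
  unfold Pre_numberToHytes; infer_instance
def pvWitness_numberToHytes : Int × Int := (100, 7)

def Spec_numberToHytes (value : Int) (bits : Int) (out : List Int) : Prop := out = numberToHytes_alt value bits
instance (value : Int) (bits : Int) (out : List Int) : Decidable (Spec_numberToHytes value bits out) := by unfold Spec_numberToHytes; infer_instance

-- ===== CLAIM (what is proved, stated in full; the proofs are below) =====
def Claim_equal_numberToHytes : Prop := ∀ (value : Int) (bits : Int), Dom_numberToHytes value bits → Pre_numberToHytes value bits → Spec_numberToHytes value bits (numberToHytes value bits)

-- ===== LEMMAS AND PROOFS =====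

-- Python '&' with an all-ones mask is emod
theorem pv_band_mask (x : Int) (k : Nat) :
    PySem.Int.band x ((2 : Int) ^ k - 1) = x.emod (2 ^ k) := by
  have hk : (1:Nat) ≤ 2 ^ k := Nat.one_le_two_pow
  have hcast : ((2:Int) ^ k - 1) = (((2 ^ k - 1 : Nat)) : Int) := by push_cast [hk]; ring
  by_cases hx : 0 ≤ x
  · rcases Int.eq_ofNat_of_zero_le hx with ⟨m, rfl⟩
    rw [hcast, PySem.Int.band_natCast, Nat.and_two_pow_sub_one_eq_mod]
    push_cast
    rfl
  · obtain ⟨m, rfl⟩ : ∃ m : Nat, x = -(m+1) := ⟨(-x-1).toNat, by omega⟩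
    rw [hcast]
    unfold PySem.Int.band
    have h1 : ¬ (0:Int) ≤ -(↑m + 1) := by omega
    have h2 : (0:Int) ≤ ((2 ^ k - 1 : Nat) : Int) := by positivity
    rw [if_neg h1, if_pos h2]
    have h3 : (-(-((m:Int) + 1)) - 1).toNat = m := by omega
    have h4 : (((2 ^ k - 1 : Nat) : Int)).toNat = 2 ^ k - 1 := by
      rw [Int.toNat_natCast]
    rw [h3, h4, Nat.and_comm, Nat.and_two_pow_sub_one_eq_mod]
    have hlt : m % 2 ^ k < 2 ^ k := Nat.mod_lt _ (by positivity)
    have hrhs : (-((m:Int) + 1)).emod (2 ^ k) = 2 ^ k - 1 - ((m % 2 ^ k : Nat) : Int) := by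
      have hm : (m:Int) = 2 ^ k * ((m / 2 ^ k : Nat) : Int) + ((m % 2 ^ k : Nat) : Int) := by
        exact_mod_cast (Nat.div_add_mod m (2 ^ k)).symm
      have hsplit : -((m:Int) + 1)
          = (2 ^ k - 1 - ((m % 2 ^ k : Nat) : Int)) + (-(1 + ((m / 2 ^ k : Nat) : Int))) * 2 ^ k := by
        rw [hm]; ring
      show _ % ((2:Int)^k) = _
      rw [hsplit, Int.add_mul_emod_self_right _ _ _,
        Int.emod_eq_of_lt (by push_cast; omega) (by push_cast; omega)]
    rw [hrhs]
    omega

-- toNat commutes with nonneg emod/ediv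
theorem pv_toNat_emod (a b : Int) (ha : 0 ≤ a) (hb : 0 ≤ b) :
    (a.emod b).toNat = a.toNat % b.toNat := by
  rcases Int.eq_ofNat_of_zero_le ha with ⟨m, rfl⟩
  rcases Int.eq_ofNat_of_zero_le hb with ⟨n, rfl⟩
  rw [show ((m:Int).emod n) = ((m % n : Nat) : Int) by push_cast; rfl]
  rw [Int.toNat_natCast, Int.toNat_natCast, Int.toNat_natCast]

theorem pv_toNat_ediv (a b : Int) (ha : 0 ≤ a) (hb : 0 ≤ b) :
    (a.ediv b).toNat = a.toNat / b.toNat := by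
  rcases Int.eq_ofNat_of_zero_le ha with ⟨m, rfl⟩
  rcases Int.eq_ofNat_of_zero_le hb with ⟨n, rfl⟩
  rw [show ((m:Int).ediv n) = ((m / n : Nat) : Int) by push_cast; rfl]
  rw [Int.toNat_natCast, Int.toNat_natCast, Int.toNat_natCast]

-- bit-window extraction: (v >> A) mod 2^B = (v mod 2^(A+B)) >> A
theorem pv_shift_window (v : Int) (A B : Nat) :
    (v / (2 ^ A : Int)).emod (2 ^ B) = (v.emod (2 ^ (A + B))) / (2 ^ A : Int) := by
  have hA : (0:Int) < 2 ^ A := by positivity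
  have hAB : (0:Int) < 2 ^ (A + B) := by positivity
  set w := v.emod (2 ^ (A + B)) with hw
  have hw0 : 0 ≤ w := Int.emod_nonneg v (by positivity)
  have hwlt : w < 2 ^ (A + B) := Int.emod_lt_of_pos v hAB
  have hv : v = 2 ^ (A + B) * (v / 2 ^ (A + B)) + w := (Int.mul_ediv_add_emod v _).symm
  have hsplit : v / (2 ^ A : Int) = w / 2 ^ A + (v / 2 ^ (A + B)) * 2 ^ B := by
    conv_lhs => rw [hv]
    rw [show (2:Int) ^ (A + B) * (v / 2 ^ (A + B)) + w
        = w + (v / 2 ^ (A + B) * 2 ^ B) * 2 ^ A from by rw [pow_add]; ring]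
    rw [Int.add_mul_ediv_right _ _ (by positivity : (2:Int) ^ A ≠ 0)]
  rw [hsplit]
  show _ % ((2:Int) ^ B) = _
  rw [Int.add_mul_emod_self_right _ _ _]
  exact Int.emod_eq_of_lt (Int.ediv_nonneg hw0 hA.le)
    (by
      rw [Int.ediv_lt_iff_lt_mul hA]
      calc w < 2 ^ (A + B) := hwlt
        _ = 2 ^ B * 2 ^ A := by rw [pow_add]; ring)

-- parse helpers
theorem pvParseBin_go (l : List Char) (a : Int) :
    l.foldl (fun a c => 2 * a + (if c = '1' then 1 else 0)) a
      = a * 2 ^ l.length + pvParseBin l := by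
  induction l generalizing a with
  | nil => simp [pvParseBin]
  | cons c t ih =>
    simp only [List.foldl_cons, List.length_cons, pvParseBin] at *
    rw [ih, ih (2 * 0 + _)]
    ring

theorem pvParseBin_append (l1 l2 : List Char) :
    pvParseBin (l1 ++ l2) = pvParseBin l1 * 2 ^ l2.length + pvParseBin l2 := by
  unfold pvParseBin
  rw [List.foldl_append, pvParseBin_go]
  rfl

theorem pvParseBin_bin (n : Nat) : pvParseBin (pvBinDigits n) = (n : Int) := by
  induction n using Nat.strong_induction_on with
  | _ n ih =>
    unfold pvBinDigits
    by_cases h : n = 0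
    · simp [h, pvParseBin]
    · rw [if_neg h, pvParseBin_append, ih (n / 2) (Nat.div_lt_self (by omega) (by omega))]
      by_cases h2 : n % 2 = 1 <;> simp [h2, pvParseBin] <;> omega

theorem pvParseBin_replicate (k : Nat) : pvParseBin (List.replicate k '0') = 0 := by
  induction k with
  | zero => rfl
  | succ k ih =>
    rw [List.replicate_succ, show (('0'):Char) :: List.replicate k '0' = ['0'] ++ List.replicate k '0' from rfl,
      pvParseBin_append, ih]
    simp [pvParseBin]

theorem pvParseBin_format (m w : Nat) : pvParseBin (pvFormatBin m w) = (m : Int) := by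
  unfold pvFormatBin
  rw [pvParseBin_append, pvParseBin_replicate, pvParseBin_bin]
  ring

theorem pv_len_bin_le (n w : Nat) (h : n < 2 ^ w) : (pvBinDigits n).length ≤ w := by
  induction w generalizing n with
  | zero => interval_cases n; simp [pvBinDigits]
  | succ w ih =>
    unfold pvBinDigits
    by_cases h0 : n = 0
    · simp [h0]
    · rw [if_neg h0]
      have := ih (n / 2) (by omega)
      simp only [List.length_append, List.length_cons, List.length_nil]
      omega

theorem pv_len_format (m w : Nat) (h : m < 2 ^ w) : (pvFormatBin m w).length = w := by
  have := pv_len_bin_le m w h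
  simp only [pvFormatBin, List.length_append, List.length_replicate]
  omega

theorem pvFormatBin_succ (n w : Nat) :
    pvFormatBin n (w + 1) = pvFormatBin (n / 2) w ++ [if n % 2 = 1 then '1' else '0'] := by
  by_cases h : n = 0
  · subst h
    simp [pvFormatBin, pvBinDigits, List.replicate_succ']
  · unfold pvFormatBin
    conv_lhs => rw [pvBinDigits]
    rw [if_neg h]
    simp only [List.length_append, List.length_cons, List.length_nil, Nat.zero_add]
    rw [show w + 1 - ((pvBinDigits (n / 2)).length + 1) = w - (pvBinDigits (n / 2)).length by omega]
    simp [List.append_assoc]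

theorem pvFormatBin_split (c a n : Nat) :
    pvFormatBin n (a + c) = pvFormatBin (n / 2 ^ c) a ++ pvFormatBin (n % 2 ^ c) c := by
  induction c generalizing n with
  | zero =>
    have h0 : pvFormatBin 0 0 = [] := by
      rw [pvFormatBin, pvBinDigits]; simp
    simp only [pow_zero, Nat.div_one, Nat.mod_one, Nat.add_zero, h0, List.append_nil]
  | succ c ih =>
    rw [show a + (c+1) = (a + c) + 1 from rfl, pvFormatBin_succ, ih (n / 2),
      Nat.div_div_eq_div_mul, show 2 * 2 ^ c = 2 ^ (c+1) from by ring,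
      pvFormatBin_succ (n % 2 ^ (c+1)) c]
    have e1 : n % 2 ^ (c+1) / 2 = n / 2 % 2 ^ c := by
      rw [show (2:Nat) ^ (c+1) = 2 * 2 ^ c from by ring, Nat.mod_mul_right_div_self]
    have e2 : n % 2 ^ (c+1) % 2 = n % 2 := Nat.mod_mod_of_dvd n (dvd_pow_self 2 (by omega))
    rw [e1, e2, List.append_assoc]

-- the big-endian digit list both programs produce for the low 6*n bits of K
def pvHD : Nat → Nat → List Int
  | _, 0 => []
  | K, n + 1 => ((K / 2 ^ (6 * n) : Nat) : Int) :: pvHD (K % 2 ^ (6 * n)) n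

theorem pv_cast_pow (k : Nat) : ((2 ^ k : Nat) : Int) = 2 ^ k := by push_cast; rfl

theorem pvChunks6_nil : pvChunks6 [] = [] := by rw [pvChunks6]; rfl

theorem pvChunks6_format (n : Nat) : ∀ K : Nat, K < 2 ^ (6 * n) →
    pvChunks6 (pvFormatBin K (6 * n)) = pvHD K n := by
  induction n with
  | zero =>
    intro K hK
    interval_cases K
    rw [show pvFormatBin 0 (6 * 0) = [] from by rw [pvFormatBin, pvBinDigits]; simp]
    rw [pvChunks6_nil]
    rfl
  | succ n ih =>
    intro K hK
    have hdiv : K / 2 ^ (6 * n) < 2 ^ 6 := by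
      rw [Nat.div_lt_iff_lt_mul (by positivity)]
      calc K < 2 ^ (6 * (n + 1)) := hK
        _ = 2 ^ 6 * 2 ^ (6 * n) := by rw [← pow_add]; ring_nf
    have hsplit : pvFormatBin K (6 * (n + 1))
        = pvFormatBin (K / 2 ^ (6 * n)) 6 ++ pvFormatBin (K % 2 ^ (6 * n)) (6 * n) := by
      rw [show 6 * (n + 1) = 6 + 6 * n from by ring, pvFormatBin_split]
    have hlen : (pvFormatBin (K / 2 ^ (6 * n)) 6).length = 6 := pv_len_format _ _ hdiv
    rw [hsplit, pvChunks6]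
    rw [if_neg (by simp [← List.length_pos_iff, hlen])]
    rw [List.take_left' hlen, List.drop_left' hlen]
    rw [pvParseBin_format, ih (K % 2 ^ (6 * n)) (Nat.mod_lt _ (by positivity))]
    rfl

-- A's loop as structural recursion
def pvF (v : Int) : Nat → Int × List Int
  | 0 => (v, [])
  | n + 1 =>
    let p := pvF v n
    (PySem.Int.floordiv p.1 64, p.2 ++ [PySem.Int.mod p.1 64])

theorem pvF_foldl (n : Nat) (v : Int) :
    (PySem.List.pyRange 0 (n : Int) 1).foldl
      (fun (st : Int × List Int) _ =>
        (PySem.Int.floordiv st.1 64, st.2 ++ [PySem.Int.mod st.1 64])) (v, [])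
      = pvF v n := by
  induction n with
  | zero =>
    rw [PySem.List.pyRange_one_eq_nil (by simp)]
    rfl
  | succ n ih =>
    rw [show ((n + 1 : Nat) : Int) = (n : Int) + 1 from by push_cast; ring,
      PySem.List.pyRange_one_succ_right (by positivity), List.foldl_append, ih]
    rfl

theorem pvF_fst (v : Int) (n : Nat) : (pvF v n).1 = v / (2 ^ (6 * n) : Int) := by
  induction n with
  | zero => simp [pvF]
  | succ n ih =>
    show PySem.Int.floordiv (pvF v n).1 64 = _
    rw [ih, PySem.Int.floordiv_eq_ediv_of_pos (by norm_num),
      Int.ediv_ediv_of_nonneg (by positivity : (0:Int) ≤ 2 ^ (6 * n)),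
      show (2 ^ (6 * n) * 64 : Int) = 2 ^ (6 * (n + 1)) from by
        rw [show (64:Int) = 2 ^ 6 from by norm_num, ← pow_add]; ring_nf]

theorem pv_emod_toNat_mod (v : Int) (A B : Nat) :
    (v.emod (2 ^ (A + B))).toNat % 2 ^ A = (v.emod (2 ^ A)).toNat := by
  have hp : ((2:Int) ^ A).toNat = 2 ^ A := by rw [← pv_cast_pow, Int.toNat_natCast]
  have h2 : (v.emod (2 ^ (A + B))).emod (2 ^ A) = v.emod (2 ^ A) :=
    Int.emod_emod_of_dvd v (by exact_mod_cast pow_dvd_pow 2 (Nat.le_add_right A B))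
  have h1 := pv_toNat_emod (v.emod (2 ^ (A + B))) (2 ^ A)
    (Int.emod_nonneg v (by positivity)) (by positivity)
  rw [hp, h2] at h1
  exact h1.symm

theorem pv_emod_toNat_div (v : Int) (A B : Nat) :
    (v.emod (2 ^ (A + B))).toNat / 2 ^ A = ((v / 2 ^ A).emod (2 ^ B)).toNat := by
  have hp : ((2:Int) ^ A).toNat = 2 ^ A := by rw [← pv_cast_pow, Int.toNat_natCast]
  have h3 : (v.emod (2 ^ (A + B))).ediv (2 ^ A) = (v / 2 ^ A).emod (2 ^ B) :=
    (pv_shift_window v A B).symm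
  have h1 := pv_toNat_ediv (v.emod (2 ^ (A + B))) (2 ^ A)
    (Int.emod_nonneg v (by positivity)) (by positivity)
  rw [hp] at h1
  rw [← h1]
  exact congrArg Int.toNat h3

theorem pvF_snd (v : Int) (n : Nat) :
    (pvF v n).2.reverse = pvHD ((v.emod (2 ^ (6 * n))).toNat) n := by
  induction n with
  | zero => rfl
  | succ n ih =>
    show ((pvF v n).2 ++ [PySem.Int.mod (pvF v n).1 64]).reverse = _
    rw [List.reverse_append, List.reverse_singleton, List.singleton_append, ih, pvF_fst, pvHD]
    rw [show 6 * (n + 1) = 6 * n + 6 from by ring]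
    rw [pv_emod_toNat_mod v (6 * n) 6, pv_emod_toNat_div v (6 * n) 6]
    rw [Int.toNat_of_nonneg (show (0:Int) ≤ (v / 2 ^ (6 * n)).emod (2 ^ 6) from
      Int.emod_nonneg _ (by norm_num))]
    rw [PySem.Int.mod_eq_emod_of_pos (by norm_num : (0:Int) < 64),
      show (64:Int) = 2 ^ 6 from by norm_num]
    rfl

-- ===== VERDICT (by name: the statement is the Claim_ definition above) =====
theorem pv_head_eq (value : Int) (n r : Nat) :
    ((value.emod (2 ^ (6 * n + r))).toNat / 2 ^ (6 * n) : Nat)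
      = ((value / 2 ^ (6 * n)).emod (2 ^ r)).toNat :=
  pv_emod_toNat_div value (6 * n) r

theorem numberToHytes_spec : Claim_equal_numberToHytes := by
  intro value bits _ hpre
  unfold Spec_numberToHytes
  rcases Int.eq_ofNat_of_zero_le hpre with ⟨b, rfl⟩
  obtain ⟨n, r, hb, hr6⟩ : ∃ n r : Nat, b = 6 * n + r ∧ r < 6 :=
    ⟨b / 6, b % 6, (Nat.div_add_mod b 6).symm, Nat.mod_lt _ (by omega)⟩
  subst hb
  set b := 6 * n + r with hb
  have hfd : PySem.Int.floordiv (b:Int) 6 = (n:Int) := by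
    rw [PySem.Int.floordiv_eq_ediv_of_pos (by norm_num)]; omega
  have hmod : PySem.Int.mod (b:Int) 6 = (r:Int) := by
    rw [PySem.Int.mod_eq_emod_of_pos (by norm_num)]; omega
  have htn : ((b:Int)).toNat = b := Int.toNat_natCast b
  have hA : numberToHytes value (b:Int)
      = (if (r:Int) > 0
          then (pvF value n).2 ++ [PySem.Int.band (pvF value n).1 (2 ^ ((r:Int)).toNat - 1)]
          else (pvF value n).2).reverse := by
    rw [numberToHytes]
    simp only [hfd, hmod, pvF_foldl]
  have hm : PySem.Int.band value (2 ^ ((b:Int)).toNat - 1) = value.emod (2 ^ b) := by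
    rw [htn]; exact pv_band_mask value b
  have hemod0 : 0 ≤ value.emod (2 ^ b) := Int.emod_nonneg _ (by positivity)
  have hemodlt : value.emod (2 ^ b) < 2 ^ b := Int.emod_lt_of_pos _ (by positivity)
  have hMlt : (value.emod (2 ^ b)).toNat < 2 ^ b := by
    have hc := pv_cast_pow b
    omega
  by_cases hr : r = 0
  · -- no leftover bits: b = 6 * n
    subst hr
    rw [hA, if_neg (by norm_num)]
    rw [pvF_snd]
    by_cases hb0 : n = 0
    · subst hb0
      rfl
    · rw [numberToHytes_alt, if_neg (by simp [hb]; omega)]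
      simp only [hmod, htn]
      rw [pv_band_mask value b, if_neg (by norm_num)]
      have := pvChunks6_format n (value.emod (2 ^ b)).toNat (by omega)
      rw [show b = 6 * n from by omega] at *
      exact this.symm
  · -- r leftover bits on top
    have hrpos : (0:Int) < (r:Int) := by exact_mod_cast Nat.pos_of_ne_zero hr
    rw [hA, if_pos hrpos, List.reverse_append, List.reverse_singleton,
      List.singleton_append, pvF_snd, pvF_fst, Int.toNat_natCast,
      pv_band_mask]
    rw [numberToHytes_alt, if_neg (by simp [hb]; omega)]
    simp only [hmod, htn]
    rw [pv_band_mask value b, if_pos hrpos, Int.toNat_natCast]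
    have hdiv : (value.emod (2 ^ b)).toNat / 2 ^ (6 * n) < 2 ^ r := by
      rw [Nat.div_lt_iff_lt_mul (by positivity)]
      calc (value.emod (2 ^ b)).toNat < 2 ^ b := hMlt
        _ = 2 ^ r * 2 ^ (6 * n) := by rw [← pow_add]; congr 1; omega
    have hsplit : pvFormatBin (value.emod (2 ^ b)).toNat b
        = pvFormatBin ((value.emod (2 ^ b)).toNat / 2 ^ (6 * n)) r
          ++ pvFormatBin ((value.emod (2 ^ b)).toNat % 2 ^ (6 * n)) (6 * n) := by
      rw [show b = r + 6 * n from by omega, pvFormatBin_split]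
    have hlen1 := pv_len_format _ _ hdiv
    rw [hsplit, List.take_left' hlen1, List.drop_left' hlen1, pvParseBin_format]
    rw [pvChunks6_format n _ (Nat.mod_lt _ (by positivity))]
    rw [show (value.emod (2 ^ b)).toNat % 2 ^ (6 * n)
        = (value.emod (2 ^ (6 * n))).toNat from pv_emod_toNat_mod value (6 * n) r]
    rw [show (value.emod (2 ^ b)).toNat / 2 ^ (6 * n)
        = ((value / 2 ^ (6 * n)).emod (2 ^ r)).toNat from pv_head_eq value n r]
    rw [Int.toNat_of_nonneg (show (0:Int) ≤ (value / 2 ^ (6 * n)).emod (2 ^ r) from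
      Int.emod_nonneg _ (by positivity))]
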